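-- pv_equiv track=rewrite | github.com/tarunganesh2004/GFG | 2025/June/8th_june.py | sum_string
-- ===== SOURCE A (Python) =====
-- def sum_string(s):
--     n=len(s)
--     def addStrings(num1, num2):
--         if len(num1) < len(num2):
--             num1, num2 = num2, num1
--         len1= len(num1)
--         len2= len(num2)
--         sum=""
--         carry=0
--
--         for i in range(len2):
--             d1=ord(num1[len1-1-i])-ord('0')
--             d2=ord(num2[len2-1-i])-ord('0')
--             digit=(d1 + d2 + carry) % 10
--             carry=(d1 + d2 + carry) // 10
--             sum=chr(digit + ord('0')) + sum
--
--         for i in range(len2, len1):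
--             d1=ord(num1[len1-1-i])-ord('0')
--             digit=(d1 + carry) % 10
--             carry=(d1 + carry) // 10
--             sum=chr(digit + ord('0')) + sum
--
--         if carry:
--             sum=chr(carry + ord('0')) + sum
--         return sum
--
--
--     def checkSequence(s,start,i,j):
--         part1=s[start:start+i]
--         part2=s[start+i:start+i+j]
--         expectedSum=addStrings(part1,part2)
--
--         sumLen=len(expectedSum)
--         if start+i+j+sumLen > n:
--             return False
--
--         if expectedSum == s[start+i+j:start+i+j+sumLen]:
--             return True
--
--         return checkSequence(s,start+i,j,sumLen)
--     for i in range(1,n):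
--         for j in range(1,n-i):
--             if checkSequence(s,0,i,j):
--                 return True
--     return False
-- ===== SOURCE B (Python) =====
-- def sum_string(s):
--     n = len(s)
--
--     def add(a, b):
--         x = [ord(c) - 48 for c in reversed(a)]
--         y = [ord(c) - 48 for c in reversed(b)]
--         out = []
--         carry = 0
--         while x or y:
--             d = (x.pop(0) if x else 0) + (y.pop(0) if y else 0) + carry
--             out.append(d % 10)
--             carry = d // 10
--         if carry:
--             out.append(carry)
--         return ''.join(chr(d + 48) for d in reversed(out))
--
--     for i in range(1, n):
--         for j in range(1, n - i):
--             prev, rest, k = s[:i], s[i:], j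
--             while True:
--                 cur, tail = rest[:k], rest[k:]
--                 t = add(prev, cur)
--                 if len(t) > len(tail):
--                     break
--                 if tail[:len(t)] == t:
--                     return True
--                 prev, rest, k = cur, tail, len(t)
--     return False
-- ===== Notes on version B (the rewrite author's own statement) =====
-- stated objective: alternative
-- what changed: B replaces the index-arithmetic recursion over (start,i,j) with a while loop over string slices (prev,rest,k) and replaces the swap-plus-two-indexed-loops addition with a single symmetric head-consuming loop over lsb-first digit lists.
import Mathlib
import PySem

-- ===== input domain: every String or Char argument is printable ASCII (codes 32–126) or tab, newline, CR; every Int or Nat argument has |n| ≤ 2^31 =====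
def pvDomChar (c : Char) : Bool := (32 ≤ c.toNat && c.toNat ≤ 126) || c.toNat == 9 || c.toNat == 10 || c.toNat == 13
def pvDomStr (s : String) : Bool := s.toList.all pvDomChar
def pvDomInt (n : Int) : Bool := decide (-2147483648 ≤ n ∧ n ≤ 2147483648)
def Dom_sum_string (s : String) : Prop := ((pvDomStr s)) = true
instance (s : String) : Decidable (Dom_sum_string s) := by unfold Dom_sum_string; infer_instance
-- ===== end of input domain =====

-- B replaces the index-arithmetic recursion with a while loop over string slices (prev,rest,k)
-- and the swap+two-indexed-loops addition with one symmetric head-consuming pass over lsb-first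
-- digit lists; same return value, no speed claim.

-- ord(c) - ord('0')
def pvDv (c : Char) : Int := (c.toNat : Int) - 48
-- chr(d + ord('0'))  (d + 48 is provably nonnegative wherever either program uses it)
def pvChr (d : Int) : Char := Char.ofNat (d + 48).toNat

-- ===== PORT A =====
-- addStrings after the possible swap (num2 is the shorter string); `for i in range(m)` is ported as a
-- foldl over List.range m (exact: all the Python range bounds here are nonnegative), Python's `//` and
-- `%` as PySem.Int.floordiv / PySem.Int.mod, and the in-range index num[len-1-i] via List.getD.
def pvAddACore (num1 num2 : List Char) : List Char :=
  let len1 := num1.length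
  let len2 := num2.length
  let p := (List.range len2).foldl (fun (p : List Char × Int) i =>
      let d1 := pvDv (num1.getD (len1 - 1 - i) ' ')
      let d2 := pvDv (num2.getD (len2 - 1 - i) ' ')
      (pvChr (PySem.Int.mod (d1 + d2 + p.2) 10) :: p.1, PySem.Int.floordiv (d1 + d2 + p.2) 10)) ([], 0)
  -- for i in range(len2, len1): the index i is len2 + i' with i' in range(len1 - len2)
  let q := (List.range (len1 - len2)).foldl (fun (p : List Char × Int) i =>
      let d1 := pvDv (num1.getD (len1 - 1 - (len2 + i)) ' ')
      (pvChr (PySem.Int.mod (d1 + p.2) 10) :: p.1, PySem.Int.floordiv (d1 + p.2) 10)) p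
  if q.2 ≠ 0 then pvChr q.2 :: q.1 else q.1

def pvAddA (num1 num2 : List Char) : List Char :=
  if num1.length < num2.length then pvAddACore num2 num1 else pvAddACore num1 num2

-- checkSequence; the recursion is given fuel n+1, which the Python recursion never exhausts
-- (start grows by i ≥ 1 on every recursive call and recursion requires start+i+j+sumLen ≤ n).
-- Nonnegative Python slices s[a:b] are ported as (drop a).take (b-a) (exact: same clamping).
def pvCheckA (s : List Char) (fuel : Nat) (start i j : Nat) : Bool :=
  match fuel with
  | 0 => false
  | fuel + 1 =>
    let n := s.length
    let part1 := (s.drop start).take i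
    let part2 := (s.drop (start + i)).take j
    let expectedSum := pvAddA part1 part2
    let sumLen := expectedSum.length
    if start + i + j + sumLen > n then false
    else if expectedSum == (s.drop (start + i + j)).take sumLen then true
    else pvCheckA s fuel (start + i) j sumLen

def sum_string (s : String) : Bool :=
  let l := s.toList
  let n := l.length
  -- for i in range(1, n): for j in range(1, n-i): if checkSequence(...): return True
  (List.range' 1 (n - 1)).any fun i =>
    (List.range' 1 (n - i - 1)).any fun j => pvCheckA l (n + 1) 0 i j

-- ===== PORT B =====
-- B's `while x or y` loop consuming the heads of the two lsb-first digit lists, written as the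
-- equivalent four-case structural recursion ((x.pop(0) if x else 0) = the head or 0); the digits
-- are appended lsb-first and reversed at the end, exactly as Source B's `out` list.
def pvAddRev : List Int → List Int → Int → List Int
  | [], [], c => if c ≠ 0 then [c] else []
  | x :: xs, [], c =>
      PySem.Int.mod (x + 0 + c) 10 :: pvAddRev xs [] (PySem.Int.floordiv (x + 0 + c) 10)
  | [], y :: ys, c =>
      PySem.Int.mod (0 + y + c) 10 :: pvAddRev [] ys (PySem.Int.floordiv (0 + y + c) 10)
  | x :: xs, y :: ys, c =>
      PySem.Int.mod (x + y + c) 10 :: pvAddRev xs ys (PySem.Int.floordiv (x + y + c) 10)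

-- add(a, b): digit chars → lsb-first ints, one symmetric pass, then reverse and re-encode
def pvAddB (a b : List Char) : List Char :=
  (pvAddRev (a.reverse.map pvDv) (b.reverse.map pvDv) 0).reverse.map pvChr

-- B's `while True` loop over (prev, rest, k); `break` = false, fuel n+1 as for A's recursion.
def pvChaseB (fuel : Nat) (prev rest : List Char) (k : Nat) : Bool :=
  match fuel with
  | 0 => false
  | fuel + 1 =>
    let cur := rest.take k
    let tail := rest.drop k
    let t := pvAddB prev cur
    if t.length > tail.length then false
    else if tail.take t.length == t then true
    else pvChaseB fuel cur tail t.length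

def sum_string_alt (s : String) : Bool :=
  let l := s.toList
  let n := l.length
  (List.range' 1 (n - 1)).any fun i =>
    (List.range' 1 (n - i - 1)).any fun j => pvChaseB (n + 1) (l.take i) (l.drop i) j

-- ===== PRECONDITION & SPEC =====
def Spec_sum_string (s : String) (out : Bool) : Prop := out = sum_string_alt s
instance (s : String) (out : Bool) : Decidable (Spec_sum_string s out) := by unfold Spec_sum_string; infer_instance

-- ===== CLAIM (what is proved, stated in full; the proofs are below) =====
def Claim_equal_sum_string : Prop := ∀ (s : String), Dom_sum_string s → Spec_sum_string s (sum_string s)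

-- ===== LEMMAS AND PROOFS =====

-- Characterisation of A's addition: inputs least-significant-digit first (second no longer than
-- the first), output lsb-first.
def pvGen : List Char → List Char → Int → List Char
  | [], _, c => if c ≠ 0 then [pvChr c] else []
  | x :: xs, [], c =>
      pvChr (PySem.Int.mod (pvDv x + c) 10) :: pvGen xs [] (PySem.Int.floordiv (pvDv x + c) 10)
  | x :: xs, y :: ys, c =>
      pvChr (PySem.Int.mod (pvDv x + pvDv y + c) 10) ::
        pvGen xs ys (PySem.Int.floordiv (pvDv x + pvDv y + c) 10)

-- step functions of A's two loops (definitionally the loop bodies of the port)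
def pvStepA1 (p : List Char × Int) (x : Char) : List Char × Int :=
  (pvChr (PySem.Int.mod (pvDv x + p.2) 10) :: p.1, PySem.Int.floordiv (pvDv x + p.2) 10)

def pvStepA2 (p : List Char × Int) (xy : Char × Char) : List Char × Int :=
  (pvChr (PySem.Int.mod (pvDv xy.1 + pvDv xy.2 + p.2) 10) :: p.1,
   PySem.Int.floordiv (pvDv xy.1 + pvDv xy.2 + p.2) 10)

def pvFinA (q : List Char × Int) : List Char := if q.2 ≠ 0 then pvChr q.2 :: q.1 else q.1

lemma pv_getD_in (xs : List Char) (i : Nat) (h : i < xs.length) : xs.getD i ' ' = xs[i] :=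
  List.getD_eq_getElem xs ' ' h

-- an indexed backward fold over xs equals a forward fold over a slice of xs.reverse
lemma pv_fold_range_rev {σ : Type} (f : σ → Char → σ) (xs : List Char) (off : Nat) :
    ∀ (m : Nat) (init : σ), off + m ≤ xs.length →
      (List.range m).foldl (fun st i => f st (xs.getD (xs.length - 1 - (off + i)) ' ')) init
        = ((xs.reverse.drop off).take m).foldl f init := by
  intro m
  induction m with
  | zero => intro init h; rfl
  | succ k ih =>
    intro init h
    have hk : off + k < xs.length := by omega
    rw [List.range_succ, List.foldl_append, ih init (by omega), List.take_add_one,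
        List.foldl_append, List.getElem?_drop,
        List.getElem?_reverse (by omega), List.getElem?_eq_getElem (by omega)]
    simp only [List.foldl, Option.toList_some]
    rw [pv_getD_in xs (xs.length - 1 - (off + k)) (by omega)]

-- two-list version for the paired part of A's addition
lemma pv_fold_range_rev2 {σ : Type} (f : σ → Char × Char → σ) (xs ys : List Char) :
    ∀ (m : Nat) (init : σ), m ≤ xs.length → m ≤ ys.length →
      (List.range m).foldl
          (fun st i => f st (xs.getD (xs.length - 1 - i) ' ', ys.getD (ys.length - 1 - i) ' ')) init
        = ((xs.reverse.take m).zip (ys.reverse.take m)).foldl f init := by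
  intro m
  induction m with
  | zero => intro init _ _; rfl
  | succ k ih =>
    intro init hx hy
    have hxk : k < xs.length := by omega
    have hyk : k < ys.length := by omega
    rw [List.range_succ, List.foldl_append, ih init (by omega) (by omega),
        List.take_add_one, List.take_add_one,
        List.zip_append (by simp [List.length_take]; omega), List.foldl_append,
        List.getElem?_reverse (by omega), List.getElem?_reverse (by omega),
        List.getElem?_eq_getElem (by omega), List.getElem?_eq_getElem (by omega)]
    simp only [Option.toList_some, List.zip_cons_cons, List.zip_nil_right, List.foldl]
    rw [pv_getD_in xs (xs.length - 1 - k) (by omega), pv_getD_in ys (ys.length - 1 - k) (by omega)]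

-- structural characterisation of A's tail loop + carry step
lemma pv_A0 : ∀ (r1 acc : List Char) (c : Int),
    pvFinA (r1.foldl pvStepA1 (acc, c)) = (pvGen r1 [] c).reverse ++ acc := by
  intro r1
  induction r1 with
  | nil => intro acc c; by_cases h : c ≠ 0 <;> simp [pvFinA, pvGen, h]
  | cons x xs ih =>
    intro acc c
    simp only [List.foldl_cons, pvStepA1, pvGen, List.reverse_cons, List.append_assoc,
      List.cons_append, List.nil_append]
    exact ih _ _

lemma pv_A2 : ∀ (r2 r1 acc : List Char) (c : Int), r2.length ≤ r1.length →
    pvFinA ((r1.drop r2.length).foldl pvStepA1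
        (((r1.take r2.length).zip (r2.take r2.length)).foldl pvStepA2 (acc, c)))
      = (pvGen r1 r2 c).reverse ++ acc := by
  intro r2
  induction r2 with
  | nil => intro r1 acc c _; simpa using pv_A0 r1 acc c
  | cons y ys ih =>
    intro r1 acc c h
    match r1 with
    | [] => simp at h
    | x :: xs =>
      simp only [List.length_cons, List.take_succ_cons, List.drop_succ_cons,
        pvGen, List.reverse_cons, List.append_assoc, List.cons_append, List.nil_append]
      exact ih xs _ _ (by simpa using h)

lemma pv_coreA (num1 num2 : List Char) (h : num2.length ≤ num1.length) :
    pvAddACore num1 num2 = (pvGen num1.reverse num2.reverse 0).reverse := by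
  have e2 := pv_fold_range_rev2 (f := pvStepA2) num1 num2 num2.length ([], (0 : Int)) h le_rfl
  have e1 := pv_fold_range_rev (f := pvStepA1) num1 num2.length (num1.length - num2.length)
      (((num1.reverse.take num2.length).zip (num2.reverse.take num2.length)).foldl pvStepA2
        ([], (0 : Int))) (by omega)
  have htk : ((num1.reverse.drop num2.length).take (num1.length - num2.length))
      = num1.reverse.drop num2.length := by
    apply List.take_of_length_le; simp
  show pvFinA ((List.range (num1.length - num2.length)).foldl
      (fun p i => pvStepA1 p (num1.getD (num1.length - 1 - (num2.length + i)) ' '))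
      ((List.range num2.length).foldl
        (fun p i => pvStepA2 p (num1.getD (num1.length - 1 - i) ' ',
          num2.getD (num2.length - 1 - i) ' ')) ([], 0))) = _
  rw [e2, e1, htk]
  have := pv_A2 num2.reverse num1.reverse [] 0 (by simpa using h)
  simpa [List.length_reverse, List.take_of_length_le, List.take_length] using this

-- B's symmetric recursion is commutative in its two digit lists
lemma pv_addrev_comm : ∀ (x y : List Int) (c : Int), pvAddRev x y c = pvAddRev y x c := by
  intro x
  induction x with
  | nil =>
    intro y
    induction y with
    | nil => intro c; rfl
    | cons b ys ihy =>
      intro c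
      simp only [pvAddRev]
      rw [show (0 : Int) + b + c = b + 0 + c by ring, ihy]
  | cons a xs ih =>
    intro y c
    cases y with
    | nil =>
      simp only [pvAddRev]
      rw [show (0 : Int) + a + c = a + 0 + c by ring, ih []]
    | cons b ys =>
      simp only [pvAddRev]
      rw [show b + a + c = a + b + c by ring, ih ys]

-- pvGen (chars, second list no longer) is B's recursion through the digit encoding
lemma pv_gen_addrev : ∀ (x y : List Char) (c : Int), y.length ≤ x.length →
    pvGen x y c = (pvAddRev (x.map pvDv) (y.map pvDv) c).map pvChr := by
  intro x
  induction x with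
  | nil =>
    intro y c h
    have h0 : y = [] := List.eq_nil_of_length_eq_zero (by simpa using h)
    subst h0
    by_cases hc : c ≠ 0 <;> simp [pvGen, pvAddRev, hc]
  | cons a xs ih =>
    intro y c h
    cases y with
    | nil =>
      simp only [pvGen, List.map_cons, pvAddRev, add_zero, List.map]
      rw [ih [] _ (by simp)]
      simp
    | cons b ys =>
      simp only [pvGen, List.map_cons, pvAddRev, List.map]
      rw [ih ys _ (by simpa using h)]

lemma pv_add_eq (a b : List Char) : pvAddA a b = pvAddB a b := by
  unfold pvAddA pvAddB
  split_ifs with h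
  · rw [pv_coreA b a (by omega),
        pv_gen_addrev b.reverse a.reverse 0 (by simpa using Nat.le_of_lt h),
        pv_addrev_comm]
    simp [List.map_reverse]
  · rw [pv_coreA a b (by omega),
        pv_gen_addrev a.reverse b.reverse 0 (by simpa using Nat.le_of_not_lt h)]
    simp [List.map_reverse]

lemma pv_beq_comm (a b : List Char) : (a == b) = (b == a) := by
  by_cases h : a = b
  · simp [h]
  · simp [beq_eq_false_iff_ne.mpr h, beq_eq_false_iff_ne.mpr (Ne.symm h)]

-- A's index-state recursion equals B's slice-state loop (invariant: start+i+j ≤ n, which the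
-- Python programs maintain, so the slice lengths are exact)
lemma pv_check_chase (s : List Char) :
    ∀ (fuel start i j : Nat), start + i + j ≤ s.length →
      pvCheckA s fuel start i j
        = pvChaseB fuel ((s.drop start).take i) (s.drop (start + i)) j := by
  intro fuel
  induction fuel with
  | zero => intro _ _ _ _; rfl
  | succ f ih =>
    intro start i j hb
    simp only [pvCheckA, pvChaseB, List.drop_drop]
    rw [pv_add_eq, pv_beq_comm]
    set t := pvAddB (List.take i (List.drop start s)) (List.take j (List.drop (start + i) s)) with ht
    have hlen : (List.drop (start + i + j) s).length = s.length - (start + i + j) := by simp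
    have hcond : (start + i + j + t.length > s.length)
        = (t.length > (List.drop (start + i + j) s).length) := by
      rw [hlen]; simp only [eq_iff_iff, gt_iff_lt]; omega
    simp only [hcond]
    split_ifs with h1 h2
    · rfl
    · rfl
    · exact ih (start + i) j t.length (by rw [hlen] at h1; omega)

-- Bool.any congruence under a membership hypothesis
lemma pv_any_congr {α : Type} (l : List α) (f g : α → Bool) (h : ∀ x ∈ l, f x = g x) :
    l.any f = l.any g := by
  induction l with
  | nil => rfl
  | cons a l ih =>
    simp only [List.any_cons, h a (by simp), ih (fun x hx => h x (by simp [hx]))]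

-- ===== VERDICT (by name: the statement is the Claim_ definition above) =====
theorem sum_string_spec : Claim_equal_sum_string := by
  intro s _
  unfold Spec_sum_string sum_string sum_string_alt
  apply pv_any_congr
  intro i hi
  apply pv_any_congr
  intro j hj
  rw [List.mem_range'_1] at hi hj
  have h := pv_check_chase s.toList (s.toList.length + 1) 0 i j (by omega)
  simpa using h
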